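-- pv_equiv track=rewrite | github.com/vargamick/crawl4ai | crawl4ai/agar/utils.py | detect_media_format
-- ===== SOURCE A (Python) =====
-- from typing import List, Optional, Dict, Any
--
-- def detect_media_format(url: str) -> Optional[str]:
--     """
--     Detect media format from URL or filename.
--
--     Args:
--         url: Media file URL
--
--     Returns:
--         Media format string or None
--     """
--     url_lower = url.lower()
--
--     # Image formats
--     if any(ext in url_lower for ext in ['.png', '.jpg', '.jpeg', '.webp', '.gif', '.svg']):
--         for ext in ['png', 'jpg', 'jpeg', 'webp', 'gif', 'svg']:
--             if f'.{ext}' in url_lower: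
--                 return ext
--
--     # Video formats
--     if 'youtube.com' in url_lower or 'youtu.be' in url_lower:
--         return 'youtube'
--     if 'vimeo.com' in url_lower:
--         return 'vimeo'
--     if any(ext in url_lower for ext in ['.mp4', '.webm']):
--         return 'mp4' if '.mp4' in url_lower else 'webm'
--
--     # Audio formats
--     if any(ext in url_lower for ext in ['.mp3', '.wav', '.ogg']):
--         for ext in ['mp3', 'wav', 'ogg']:
--             if f'.{ext}' in url_lower:
--                 return ext
--
--     return None
-- ===== SOURCE B (Python) =====
-- # B: one ordered (needle, result) table encoding A's precedence; single scan over it.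
-- _MEDIA_TABLE = [
--     ('.png', 'png'), ('.jpg', 'jpg'), ('.jpeg', 'jpeg'),
--     ('.webp', 'webp'), ('.gif', 'gif'), ('.svg', 'svg'),
--     ('youtube.com', 'youtube'), ('youtu.be', 'youtube'),
--     ('vimeo.com', 'vimeo'),
--     ('.mp4', 'mp4'), ('.webm', 'webm'),
--     ('.mp3', 'mp3'), ('.wav', 'wav'), ('.ogg', 'ogg'),
-- ]
--
-- def detect_media_format(url: str):
--     url_lower = url.lower()
--     for needle, fmt in _MEDIA_TABLE:
--         if needle in url_lower:
--             return fmt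
--     return None
-- ===== Notes on version B (the rewrite author's own statement) =====
-- stated objective: simpler
-- what changed: Replaces A's cascade of any()-guarded branches and two inner loops with a single ordered (needle, result) table scanned once, returning the first match.
import Mathlib
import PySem

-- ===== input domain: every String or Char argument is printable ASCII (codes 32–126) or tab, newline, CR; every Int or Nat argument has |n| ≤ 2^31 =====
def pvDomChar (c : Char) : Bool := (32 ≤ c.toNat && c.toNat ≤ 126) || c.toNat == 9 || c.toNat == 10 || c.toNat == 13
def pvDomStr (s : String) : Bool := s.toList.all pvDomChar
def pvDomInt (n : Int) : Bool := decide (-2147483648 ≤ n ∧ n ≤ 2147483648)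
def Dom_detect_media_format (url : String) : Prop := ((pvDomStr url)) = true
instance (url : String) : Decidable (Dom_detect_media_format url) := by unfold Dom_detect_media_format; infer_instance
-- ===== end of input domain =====

-- B replaces A's any()-guarded branch cascade and inner loops with one ordered (needle, result) table scanned once (objective: simpler).


-- ===== PORT A =====
-- A-side helper: the video/audio branches A falls through to after the image block
def detect_media_format_rest (url_lower : String) : Option String :=
  if PySem.Str.isIn "youtube.com" url_lower || PySem.Str.isIn "youtu.be" url_lower then
    some "youtube"
  else if PySem.Str.isIn "vimeo.com" url_lower then
    some "vimeo"
  else if [".mp4", ".webm"].any (fun ext => PySem.Str.isIn ext url_lower) then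
    (if PySem.Str.isIn ".mp4" url_lower then some "mp4" else some "webm")
  else if [".mp3", ".wav", ".ogg"].any (fun ext => PySem.Str.isIn ext url_lower) then
    match ["mp3", "wav", "ogg"].find?
        (fun ext => PySem.Str.isIn ("." ++ ext) url_lower) with
    | some ext => some ext
    | none => none
  else none

def detect_media_format (url : String) : Option String :=
  let url_lower := PySem.Str.lower url
  if [".png", ".jpg", ".jpeg", ".webp", ".gif", ".svg"].any
      (fun ext => PySem.Str.isIn ext url_lower) then
    match ["png", "jpg", "jpeg", "webp", "gif", "svg"].find?
        (fun ext => PySem.Str.isIn ("." ++ ext) url_lower) with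
    | some ext => some ext
    | none => detect_media_format_rest url_lower
  else detect_media_format_rest url_lower

-- ===== PORT B =====
-- B-side: ordered (needle, result) table
def mediaTable : List (String × String) :=
  [(".png", "png"), (".jpg", "jpg"), (".jpeg", "jpeg"),
   (".webp", "webp"), (".gif", "gif"), (".svg", "svg"),
   ("youtube.com", "youtube"), ("youtu.be", "youtube"),
   ("vimeo.com", "vimeo"),
   (".mp4", "mp4"), (".webm", "webm"),
   (".mp3", "mp3"), (".wav", "wav"), (".ogg", "ogg")]

def detect_media_format_alt (url : String) : Option String :=
  let url_lower := PySem.Str.lower url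
  (mediaTable.find? (fun p => PySem.Str.isIn p.1 url_lower)).map Prod.snd

-- ===== PRECONDITION & SPEC =====
def Spec_detect_media_format (url : String) (out : Option String) : Prop := out = detect_media_format_alt url
instance (url : String) (out : Option String) : Decidable (Spec_detect_media_format url out) := by unfold Spec_detect_media_format; infer_instance

-- ===== CLAIM (what is proved, stated in full; the proofs are below) =====
def Claim_equal_detect_media_format : Prop := ∀ (url : String), Dom_detect_media_format url → Spec_detect_media_format url (detect_media_format url)

-- ===== LEMMAS AND PROOFS =====

-- ===== VERDICT (by name: the statement is the Claim_ definition above) =====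
theorem detect_media_format_spec : Claim_equal_detect_media_format := by
  intro url _
  unfold Spec_detect_media_format detect_media_format detect_media_format_alt
    detect_media_format_rest mediaTable
  simp only [List.any_cons, List.any_nil, List.find?_cons, List.find?_nil,
    show ("." ++ "png" : String) = ".png" from rfl, show ("." ++ "jpg" : String) = ".jpg" from rfl, show ("." ++ "jpeg" : String) = ".jpeg" from rfl, show ("." ++ "webp" : String) = ".webp" from rfl, show ("." ++ "gif" : String) = ".gif" from rfl, show ("." ++ "svg" : String) = ".svg" from rfl, show ("." ++ "mp3" : String) = ".mp3" from rfl, show ("." ++ "wav" : String) = ".wav" from rfl, show ("." ++ "ogg" : String) = ".ogg" from rfl]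
  generalize PySem.Str.isIn ".png" (PySem.Str.lower url) = b1
  generalize PySem.Str.isIn ".jpg" (PySem.Str.lower url) = b2
  generalize PySem.Str.isIn ".jpeg" (PySem.Str.lower url) = b3
  generalize PySem.Str.isIn ".webp" (PySem.Str.lower url) = b4
  generalize PySem.Str.isIn ".gif" (PySem.Str.lower url) = b5
  generalize PySem.Str.isIn ".svg" (PySem.Str.lower url) = b6
  generalize PySem.Str.isIn "youtube.com" (PySem.Str.lower url) = b7
  generalize PySem.Str.isIn "youtu.be" (PySem.Str.lower url) = b8
  generalize PySem.Str.isIn "vimeo.com" (PySem.Str.lower url) = b9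
  generalize PySem.Str.isIn ".mp4" (PySem.Str.lower url) = b10
  generalize PySem.Str.isIn ".webm" (PySem.Str.lower url) = b11
  generalize PySem.Str.isIn ".mp3" (PySem.Str.lower url) = b12
  generalize PySem.Str.isIn ".wav" (PySem.Str.lower url) = b13
  generalize PySem.Str.isIn ".ogg" (PySem.Str.lower url) = b14
  revert b1 b2 b3 b4 b5 b6 b7 b8 b9 b10 b11 b12 b13 b14
  decide
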